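-- pv_equiv track=rewrite | github.com/Sadegh-Moayedizadeh/coding-exercise | leetcode/hard/substring_with_concatenation_of_all_words.py | _is_concatenation_of_all_words
-- ===== SOURCE A (Python) =====
-- from collections import Counter
-- from typing import List
--
-- def _is_concatenation_of_all_words(
--     string: str, words: List[str]
-- ) -> bool:
--     word_len = len(words[0])
--     words = Counter(words)
--     i = 0
--     while i < len(string):
--         candidate = string[i: i + word_len]
--         if candidate in words and words[candidate] > 0:
--             words[candidate] -= 1
--             i += word_len
--         else:
--             return False
--     if all(val == 0 for val in words.values()):
--         return True
--     return False
-- ===== SOURCE B (Python) =====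
-- from collections import Counter
-- from typing import List
--
--
-- def _is_concatenation_of_all_words(
--     string: str, words: List[str]
-- ) -> bool:
--     word_len = len(words[0])
--     chunks = [string[i: i + word_len] for i in range(0, len(string), word_len)]
--     return Counter(chunks) == Counter(words)
-- ===== Notes on version B (the rewrite author's own statement) =====
-- stated objective: simpler
-- what changed: A's interleaved scan-and-decrement while-loop with early returns is replaced by a two-phase form: slice the whole string into fixed word_len chunks up front, then compare the chunk Counter with Counter(words).
-- outside the precondition, e.g. on _is_concatenation_of_all_words('', ['']): A returns False, B raises ValueError
import Mathlib
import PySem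

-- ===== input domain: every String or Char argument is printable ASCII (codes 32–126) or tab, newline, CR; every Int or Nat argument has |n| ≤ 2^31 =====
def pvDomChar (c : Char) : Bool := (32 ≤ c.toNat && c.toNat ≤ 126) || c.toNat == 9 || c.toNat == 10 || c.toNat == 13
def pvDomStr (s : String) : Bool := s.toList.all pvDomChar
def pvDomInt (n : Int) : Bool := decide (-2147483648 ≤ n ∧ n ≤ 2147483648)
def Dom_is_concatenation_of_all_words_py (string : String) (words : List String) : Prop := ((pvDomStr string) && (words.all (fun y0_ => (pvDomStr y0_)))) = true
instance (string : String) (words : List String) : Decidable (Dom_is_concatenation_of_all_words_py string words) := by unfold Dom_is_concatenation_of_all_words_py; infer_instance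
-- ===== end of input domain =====

-- B replaces A's interleaved scan-and-decrement loop by "slice all fixed-size chunks, then compare
-- chunk Counter with word Counter" (objective: simpler); equivalence is about the return value.
-- Strings are handled on the List Char side throughout (PySem convention).

-- ===== PORT A =====
-- the while-loop of A; `fuel` only totalizes the recursion (fuel = len(string)+1 is never exhausted
-- under Pre_, since i grows by word_len ≥ 1 each iteration); at fuel 0 we return the loop-exit value.
def pvConcatLoop (s : List Char) (L : Int) (fuel : Nat) (c : PySem.Dict (List Char) Int) (i : Int) : Bool :=
  match fuel with
  | 0 => c.values.all (fun v => v == 0)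
  | fuel + 1 =>
    if i < (s.length : Int) then
      let cand := PySem.List.slice s (some i) (some (i + L))      -- string[i : i + word_len]
      if c.contains cand && decide (0 < c.getD cand 0) then       -- candidate in words and words[candidate] > 0
        pvConcatLoop s L fuel (c.insert cand (c.getD cand 0 - 1)) (i + L)   -- words[candidate] -= 1; i += word_len
      else false
    else c.values.all (fun v => v == 0)                           -- all(val == 0 for val in words.values())

def is_concatenation_of_all_words_py (string : String) (words : List String) : Bool :=
  let word_len := PySem.Str.len (PySem.List.pyGetD words 0 "")    -- len(words[0]); IndexError on words = [] is outside Pre_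
  let wcount := PySem.Dict.counter (words.map String.toList)      -- Counter(words)
  pvConcatLoop string.toList word_len (string.toList.length + 1) wcount 0

-- ===== PORT B =====
-- Python Counter equality (all stored counts here are ≥ 1, so plain key/count comparison is exact)
def pvCounterEq (d1 d2 : PySem.Dict (List Char) Int) : Bool :=
  d1.items.all (fun p => d2.getD p.1 0 == p.2) && d2.items.all (fun p => d1.getD p.1 0 == p.2)

def is_concatenation_of_all_words_py_alt (string : String) (words : List String) : Bool :=
  let word_len := PySem.Str.len (PySem.List.pyGetD words 0 "")    -- len(words[0])
  let s := string.toList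
  let chunks := (PySem.List.pyRange 0 (s.length : Int) word_len).map
      (fun i => PySem.List.slice s (some i) (some (i + word_len)))  -- [string[i:i+word_len] for i in range(0, len(string), word_len)]
  pvCounterEq (PySem.Dict.counter chunks) (PySem.Dict.counter (words.map String.toList))

-- ===== PRECONDITION & SPEC =====
-- Pre_ excludes the empty words list (A raises IndexError on words[0]) and an empty first word
-- (word_len == 0: A returns False there only by accident of its decrement loop, while B's
-- range(0, len(string), 0) raises ValueError).
def Pre_is_concatenation_of_all_words_py (string : String) (words : List String) : Prop :=
  words ≠ [] ∧ 0 < PySem.Str.len (PySem.List.pyGetD words 0 "")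
instance (string : String) (words : List String) : Decidable (Pre_is_concatenation_of_all_words_py string words) := by unfold Pre_is_concatenation_of_all_words_py; infer_instance

def pvWitness_is_concatenation_of_all_words_py : String × List String := ("barfoo", ["foo", "bar"])

def Spec_is_concatenation_of_all_words_py (string : String) (words : List String) (out : Bool) : Prop := out = is_concatenation_of_all_words_py_alt string words
instance (string : String) (words : List String) (out : Bool) : Decidable (Spec_is_concatenation_of_all_words_py string words out) := by unfold Spec_is_concatenation_of_all_words_py; infer_instance

-- ===== CLAIM (what is proved, stated in full; the proofs are below) =====
def Claim_equal_is_concatenation_of_all_words_py : Prop := ∀ (string : String) (words : List String), Dom_is_concatenation_of_all_words_py string words → Pre_is_concatenation_of_all_words_py string words → Spec_is_concatenation_of_all_words_py string words (is_concatenation_of_all_words_py string words)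

-- ===== LEMMAS AND PROOFS =====

-- range(a, b, L) with positive step L is empty when b ≤ a, and a :: range(a+L, b, L) when a < b
lemma pvRange_pos_nil (a b L : Int) (hL : 0 < L) (h : b ≤ a) :
    PySem.List.pyRange a b L = [] := by
  rw [PySem.List.pyRange_of_pos a b hL, if_neg (by omega)]
  simp

lemma pvRange_pos_cons (a b L : Int) (hL : 0 < L) (h : a < b) :
    PySem.List.pyRange a b L = a :: PySem.List.pyRange (a + L) b L := by
  rw [PySem.List.pyRange_of_pos a b hL, PySem.List.pyRange_of_pos (a+L) b hL, if_pos h]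
  have key : ((b - a + L - 1) / L).toNat
      = (if a + L < b then ((b - (a + L) + L - 1) / L).toNat else 0) + 1 := by
    have h1 : b - a + L - 1 = (b - a - 1) + 1 * L := by ring
    have h2 : (b - a + L - 1) / L = (b - a - 1) / L + 1 := by
      rw [h1, Int.add_mul_ediv_right _ _ (by omega : L ≠ 0)]
    by_cases hb : a + L < b
    · have h3 : b - (a + L) + L - 1 = b - a - 1 := by ring
      rw [h2, h3, if_pos hb]
      have : 0 ≤ (b - a - 1) / L := Int.ediv_nonneg (by omega) (by omega)
      omega
    · have h4 : (b - a - 1) / L = 0 := Int.ediv_eq_zero_of_lt (by omega) (by omega)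
      rw [h2, h4, if_neg hb]
      simp
  rw [key, List.range_succ_eq_map, List.map_cons, List.map_map]
  congr 1
  · simp
  · apply List.map_congr_left
    intro k _
    simp [Function.comp]
    ring

lemma pvKeys_insert_of_contains (c : PySem.Dict (List Char) Int) (k : List Char) (v : Int)
    (h : c.contains k = true) : (c.insert k v).keys = c.keys := by
  rw [PySem.Dict.keys, PySem.Dict.items_insert_of_contains c v h, List.map_map]
  apply List.map_congr_left
  intro p _
  by_cases hp : (p.1 == k) = true
  · simp [Function.comp, hp]
    exact (eq_of_beq hp).symm
  · simp [Function.comp, hp]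

lemma pvGetD_nonneg (c : PySem.Dict (List Char) Int) (hnn : ∀ v ∈ c.values, 0 ≤ v) (k : List Char) :
    0 ≤ c.getD k 0 := by
  rw [PySem.Dict.getD_eq_get?_getD]
  cases hg : c.get? k with
  | none => simp
  | some v =>
    have hv : (k, v) ∈ c.items := PySem.Dict.mem_items_of_get?_eq_some c hg
    have : v ∈ c.values := by
      rw [PySem.Dict.values]
      exact List.mem_map.mpr ⟨(k, v), hv, rfl⟩
    simpa using hnn v this

lemma pvAllZero_iff (c : PySem.Dict (List Char) Int) (hnd : c.keys.Nodup) :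
    (c.values.all (fun v => v == 0) = true) ↔ ∀ k, c.getD k 0 = 0 := by
  rw [List.all_eq_true]
  constructor
  · intro hall k
    by_cases hk : k ∈ c.keys
    · rw [PySem.Dict.keys] at hk
      obtain ⟨p, hp, hfst⟩ := List.mem_map.mp hk
      have hpi : (k, p.2) ∈ c.items := by
        rw [← hfst]; exact hp
      rw [PySem.Dict.getD_of_mem_items c hpi hnd 0]
      have : p.2 ∈ c.values := by
        rw [PySem.Dict.values]; exact List.mem_map.mpr ⟨p, hp, rfl⟩
      simpa using hall _ this
    · have : c.contains k = false := by
        rw [PySem.Dict.contains_eq_decide_mem_keys]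
        simpa using hk
      rw [PySem.Dict.getD_of_not_contains _ _ this]
  · intro hz v hv
    rw [PySem.Dict.values] at hv
    obtain ⟨p, hp, hsnd⟩ := List.mem_map.mp hv
    have : c.getD p.1 0 = p.2 := PySem.Dict.getD_of_mem_items c (by simpa using hp) hnd 0
    simp [← hsnd, ← this, hz p.1]

lemma pvLoop_spec (s : List Char) (L : Int) (hL : 0 < L) :
    ∀ (fuel : Nat) (i : Int) (c : PySem.Dict (List Char) Int),
      0 ≤ i → (s.length : Int) < i + fuel →
      c.keys.Nodup → (∀ v ∈ c.values, 0 ≤ v) →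
      (pvConcatLoop s L fuel c i = true ↔
        ∀ k, (((PySem.List.pyRange i (s.length : Int) L).map
            (fun j => PySem.List.slice s (some j) (some (j + L)))).count k : Int) = c.getD k 0) := by
  intro fuel
  induction fuel with
  | zero =>
    intro i c hi hfuel hnd hnn
    rw [pvRange_pos_nil i _ L hL (by exact_mod_cast (by omega : (s.length : Int) ≤ i))]
    simp only [pvConcatLoop, List.map_nil, List.count_nil, Nat.cast_zero]
    rw [pvAllZero_iff c hnd]
    exact ⟨fun h k => (h k).symm, fun h k => (h k).symm⟩
  | succ fuel ih =>
    intro i c hi hfuel hnd hnn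
    by_cases hibound : i < (s.length : Int)
    · simp only [pvConcatLoop, if_pos hibound]
      set cand := PySem.List.slice s (some i) (some (i + L)) with hcand
      rw [pvRange_pos_cons i _ L hL hibound, List.map_cons]
      by_cases hg : (c.contains cand && decide (0 < c.getD cand 0)) = true
      · rw [if_pos hg]
        obtain ⟨hcont, hpos⟩ := (Bool.and_eq_true _ _).mp hg
        have hpos' : 0 < c.getD cand 0 := of_decide_eq_true hpos
        have hnd' : (c.insert cand (c.getD cand 0 - 1)).keys.Nodup := by
          rw [pvKeys_insert_of_contains c cand _ hcont]; exact hnd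
        have hnn' : ∀ v ∈ (c.insert cand (c.getD cand 0 - 1)).values, 0 ≤ v := by
          intro v hv
          rcases PySem.Dict.mem_values_insert c cand _ v hv with h | h
          · omega
          · exact hnn v h
        rw [ih (i + L) _ (by omega) (by omega) hnd' hnn']
        constructor
        · intro h k
          have hk := h k
          rw [PySem.Dict.getD_insert] at hk
          by_cases hkc : k = cand
          · subst hkc
            rw [if_pos rfl] at hk
            rw [List.count_cons_self]
            push_cast
            omega
          · rw [if_neg hkc] at hk
            rw [List.count_cons_of_ne (fun h' => hkc h'.symm)]
            exact hk
        · intro h k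
          have hk := h k
          rw [PySem.Dict.getD_insert]
          by_cases hkc : k = cand
          · subst hkc
            rw [if_pos rfl]
            rw [List.count_cons_self] at hk
            push_cast at hk ⊢
            omega
          · rw [if_neg hkc]
            rw [List.count_cons_of_ne (fun h' => hkc h'.symm)] at hk
            exact hk
      · rw [if_neg hg]
        constructor
        · intro h; exact absurd h (by simp)
        ·
         intro hall
         exfalso
         have hk := hall cand
         have hge : 0 ≤ c.getD cand 0 := pvGetD_nonneg c hnn cand
         have hzero : c.getD cand 0 = 0 := by
           have hg' : (c.contains cand && decide (0 < c.getD cand 0)) = false := by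
             simpa using hg
           rcases Bool.and_eq_false_iff.mp hg' with h | h
           · exact PySem.Dict.getD_of_not_contains c 0 h
           · have := of_decide_eq_false h
             omega
         rw [hzero, List.count_cons_self] at hk
         push_cast at hk
         omega
    · simp only [pvConcatLoop, if_neg hibound]
      rw [pvRange_pos_nil i _ L hL (by omega)]
      simp only [List.map_nil, List.count_nil, Nat.cast_zero]
      rw [pvAllZero_iff c hnd]
      exact ⟨fun h k => (h k).symm, fun h k => (h k).symm⟩

lemma pvCounterEq_iff (xs ys : List (List Char)) :
    (pvCounterEq (PySem.Dict.counter xs) (PySem.Dict.counter ys) = true) ↔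
      ∀ k, xs.count k = ys.count k := by
  rw [pvCounterEq, Bool.and_eq_true, List.all_eq_true, List.all_eq_true]
  constructor
  · rintro ⟨h1, h2⟩ k
    by_cases hx : k ∈ xs
    · have hk : (k, (xs.count k : Int)) ∈ (PySem.Dict.counter xs).items := by
        rw [PySem.Dict.items_counter]
        exact List.mem_map.mpr ⟨k, (PySem.Set.mem_ofList xs k).mpr hx, rfl⟩
      have h := h1 _ hk
      rw [PySem.Dict.getD_counter] at h
      have h' : (ys.count k : Int) = (xs.count k : Int) := by simpa using eq_of_beq h
      exact_mod_cast h'.symm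
    · by_cases hy : k ∈ ys
      · have hk : (k, (ys.count k : Int)) ∈ (PySem.Dict.counter ys).items := by
          rw [PySem.Dict.items_counter]
          exact List.mem_map.mpr ⟨k, (PySem.Set.mem_ofList ys k).mpr hy, rfl⟩
        have h := h2 _ hk
        rw [PySem.Dict.getD_counter] at h
        have h' : (xs.count k : Int) = (ys.count k : Int) := by simpa using eq_of_beq h
        exact_mod_cast h'
      · rw [List.count_eq_zero.mpr hx, List.count_eq_zero.mpr hy]
  · intro h
    constructor <;> intro p hp
    · rw [PySem.Dict.items_counter] at hp
      obtain ⟨k, hk, rfl⟩ := List.mem_map.mp hp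
      rw [PySem.Dict.getD_counter]
      simp [h k]
    · rw [PySem.Dict.items_counter] at hp
      obtain ⟨k, hk, rfl⟩ := List.mem_map.mp hp
      rw [PySem.Dict.getD_counter]
      simp [h k]

-- ===== VERDICT (by name: the statement is the Claim_ definition above) =====
theorem is_concatenation_of_all_words_py_spec : Claim_equal_is_concatenation_of_all_words_py := by
  intro string words _hdom hpre
  obtain ⟨hne, hlen⟩ := hpre
  simp only [Spec_is_concatenation_of_all_words_py, is_concatenation_of_all_words_py,
    is_concatenation_of_all_words_py_alt]
  set L := PySem.Str.len (PySem.List.pyGetD words 0 "") with hLdef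
  set s := string.toList with hsdef
  set wl := words.map String.toList with hwldef
  have hnn : ∀ v ∈ (PySem.Dict.counter wl).values, 0 ≤ v := by
    intro v hv
    rw [PySem.Dict.values, PySem.Dict.items_counter, List.map_map] at hv
    obtain ⟨k, hk, hev⟩ := List.mem_map.mp hv
    simp only [Function.comp] at hev
    rw [← hev]
    positivity
  have hA := pvLoop_spec s L hlen (s.length + 1) 0 (PySem.Dict.counter wl) le_rfl
    (by push_cast; omega) (PySem.Dict.nodup_keys_counter wl) hnn
  have hB := pvCounterEq_iff
    ((PySem.List.pyRange 0 (s.length : Int) L).map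
      (fun i => PySem.List.slice s (some i) (some (i + L)))) wl
  have hiff : (pvConcatLoop s L (s.length + 1) (PySem.Dict.counter wl) 0 = true) ↔
      (pvCounterEq (PySem.Dict.counter ((PySem.List.pyRange 0 (s.length : Int) L).map
          (fun i => PySem.List.slice s (some i) (some (i + L)))))
        (PySem.Dict.counter wl) = true) := by
    rw [hA, hB]
    constructor
    · intro h k
      have hk := h k
      rw [PySem.Dict.getD_counter] at hk
      exact_mod_cast hk
    · intro h k
      rw [PySem.Dict.getD_counter]
      exact_mod_cast h k
  cases hx : pvConcatLoop s L (s.length + 1) (PySem.Dict.counter wl) 0 <;>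
    cases hy : pvCounterEq (PySem.Dict.counter ((PySem.List.pyRange 0 (s.length : Int) L).map
        (fun i => PySem.List.slice s (some i) (some (i + L))))) (PySem.Dict.counter wl)
  · rfl
  · exact absurd (hiff.mpr hy) (by simp [hx])
  · exact absurd (hiff.mp hx) (by simp [hy])
  · rfl
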